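-- pv_equiv track=rewrite | github.com/aspanner1/launch | lesson_3/medium/medium23.py | featured
-- ===== SOURCE A (Python) =====
-- def unique_digits(number):
--     return len(str(number)) == len(set(str(number)))
--
-- def featured(number):
--     if number >= 9876543201:
--         return "There is no possible number that fulfills those requirements."
--
--     while True:
--         number += 1
--         if number % 7 == 0 and unique_digits(number):
--             break
--
--     return number
-- ===== SOURCE B (Python) =====
-- def unique_digits(number):
--     return len(str(number)) == len(set(str(number)))
--
-- def featured(number):
--     if number >= 9876543201:
--         return "There is no possible number that fulfills those requirements."
--     n = number + 7 - number % 7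
--     while not unique_digits(n):
--         n += 7
--     return n
-- ===== Notes on version B (the rewrite author's own statement) =====
-- stated objective: faster
-- what changed: Instead of incrementing by 1 and testing divisibility by 7 on every candidate, B jumps in closed form to the first multiple of 7 strictly above the input and enumerates only multiples of 7 (step 7), testing only digit-uniqueness.
import Mathlib
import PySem

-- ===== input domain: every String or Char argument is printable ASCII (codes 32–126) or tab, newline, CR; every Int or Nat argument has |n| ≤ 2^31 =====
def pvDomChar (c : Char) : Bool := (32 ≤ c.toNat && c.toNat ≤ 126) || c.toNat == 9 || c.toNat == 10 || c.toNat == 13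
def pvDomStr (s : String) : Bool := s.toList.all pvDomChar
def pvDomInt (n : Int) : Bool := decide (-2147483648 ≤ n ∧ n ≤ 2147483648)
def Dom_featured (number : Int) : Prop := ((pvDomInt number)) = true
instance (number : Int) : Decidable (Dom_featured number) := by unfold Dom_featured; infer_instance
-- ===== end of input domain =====

-- B jumps directly to the first multiple of 7 above the input and steps by 7 testing only
-- digit-uniqueness, instead of A's step-by-1 scan testing divisibility on every candidate
-- (objective: faster by a constant factor; return-value equivalence only).
-- Both Python loops are unbounded searches; the ports run them under a generous fuel bound
-- (a totality guard only: within Dom the search ends after at most a few thousand multiples,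
-- far below the fuel) with fuels aligned (140000000 single steps = 20000000 multiples of 7),
-- so the two ports are equal on ALL inputs, fuel exhausted or not.

-- ===== PORT A =====
-- unique_digits(number): len(str(number)) == len(set(str(number)))
def unique_digits (number : Int) : Bool :=
  (PySem.Int.toStr number).length == (PySem.Set.ofList (PySem.Int.toStr number).toList).length

-- the 'while True: number += 1; if number % 7 == 0 and unique_digits(number): break' loop
def loopA : Nat → Int → Int
  | 0, _ => 0
  | f + 1, number =>
      let number := number + 1
      if PySem.Int.mod number 7 == 0 && unique_digits number then number
      else loopA f number

def featured (number : Int) : Int :=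
  if number ≥ 9876543201 then 0   -- Python returns a string here; outside Dom, nothing claimed
  else loopA 140000000 number

-- ===== PORT B =====
-- the 'while not unique_digits(n): n += 7' loop
def loopB : Nat → Int → Int
  | 0, _ => 0
  | f + 1, n => if unique_digits n then n else loopB f (n + 7)

def featured_alt (number : Int) : Int :=
  if number ≥ 9876543201 then 0   -- Python returns a string here; outside Dom, nothing claimed
  else loopB 20000000 (number + 7 - PySem.Int.mod number 7)

-- ===== PRECONDITION & SPEC =====
def Spec_featured (number : Int) (out : Int) : Prop := out = featured_alt number
instance (number : Int) (out : Int) : Decidable (Spec_featured number out) := by unfold Spec_featured; infer_instance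

-- ===== CLAIM (what is proved, stated in full; the proofs are below) =====
def Claim_equal_featured : Prop := ∀ (number : Int), Dom_featured number → Spec_featured number (featured number)

-- ===== LEMMAS AND PROOFS =====

-- PySem.Int.mod with the positive divisor 7 is Lean's emod (so omega can reason about it)
theorem mod7 (n : Int) : PySem.Int.mod n 7 = n % 7 :=
  PySem.Int.mod_eq_emod_of_pos (by norm_num)

-- skipping a non-multiple candidate
theorem loopA_skip (f : Nat) (n : Int) (h : (n + 1) % 7 ≠ 0) :
    loopA (f + 1) n = loopA f (n + 1) := by
  simp [loopA, h]

-- with ≤ 6 fuel left just past a multiple m of 7, the by-1 loop exhausts and returns 0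
theorem loopA_tail (e : Nat) : ∀ (m : Int) (k : Nat), e + k ≤ 6 → m % 7 = 0 →
    loopA e (m + k) = 0 := by
  induction e with
  | zero => intro m k _ _; simp [loopA]
  | succ e ih =>
      intro m k hk hm
      have hmod : (m + k + 1) % 7 ≠ 0 := by omega
      rw [loopA_skip e (m + k) hmod]
      have h2 : (m : Int) + k + 1 = m + (k + 1 : Nat) := by push_cast; ring
      rw [h2]
      exact ih m (k + 1) (by omega) hm

-- the core alignment: starting j (1 ≤ j ≤ 7) below a multiple m of 7 with fuel 7f + j + e
-- (e ≤ 6 trailing slack), A's by-1 loop equals B's by-7 loop on f+1 multiples starting at m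
theorem key : ∀ (f : Nat), ∀ (j e : Nat) (m : Int), 1 ≤ j → j ≤ 7 → e ≤ 6 →
    m % 7 = 0 → loopA (7 * f + j + e) (m - j) = loopB (f + 1) m := by
  intro f
  induction f using Nat.strong_induction_on with
  | _ f ihf =>
    intro j
    induction j with
    | zero => intro e m h1 _ _ _; omega
    | succ j ihj =>
      intro e m _ hj7 he hm
      rcases Nat.eq_zero_or_pos j with hj0 | hjpos
      · -- j + 1 = 1 : the candidate is m itself
        subst hj0
        have harith : (7 * f + 1 + e) = (7 * f + e) + 1 := by omega
        rw [harith]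
        have hstep : (m : Int) - (0 + 1 : Nat) + 1 = m := by push_cast; ring
        by_cases hu : unique_digits m = true
        · simp [loopA, loopB, hm, hu]
        · simp only [Bool.not_eq_true] at hu
          have hA : loopA ((7 * f + e) + 1) (m - (0 + 1 : Nat)) = loopA (7 * f + e) m := by
            simp [loopA, hm, hu]
          have hB : loopB (f + 1) m = loopB f (m + 7) := by
            simp [loopB, hu]
          rw [hA, hB]
          -- remaining: loopA (7*f + e) m = loopB f (m + 7)
          cases f with
          | zero =>
            simpa [loopB] using loopA_tail e m 0 (by omega) hm
          | succ f' =>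
            have hm7 : (m + 7) % 7 = 0 := by omega
            have := ihf f' (by omega) 7 e (m + 7) (by omega) (by omega) he hm7
            have harith2 : 7 * (f' + 1) + e = 7 * f' + 7 + e := by ring
            rw [harith2]
            have hcast : m + 7 - ((7 : Nat) : Int) = m := by norm_num
            rw [hcast] at this
            exact this
      · -- j + 1 ≥ 2 : candidate m - (j+1) + 1 = m - j is not a multiple; skip it
        have hstep : (m : Int) - (j + 1 : Nat) + 1 = m - j := by push_cast; ring
        have hmod : (m - (j + 1 : Nat) + 1) % 7 ≠ 0 := by
          rw [hstep]; omega
        have harith : 7 * f + (j + 1) + e = (7 * f + j + e) + 1 := by omega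
        rw [harith, loopA_skip _ _ hmod, hstep]
        exact ihj e m (by omega) (by omega) he hm

-- ===== VERDICT (by name: the statement is the Claim_ definition above) =====
theorem featured_spec : Claim_equal_featured := by
  intro number _
  unfold Spec_featured featured featured_alt
  by_cases hg : number ≥ 9876543201
  · simp [hg]
  · simp only [hg, if_false]
    set r : Int := PySem.Int.mod number 7 with hr
    have hre : r = number % 7 := by rw [hr, mod7]
    have hrb : 0 ≤ r ∧ r < 7 := by rw [hre]; omega
    set m : Int := number + 7 - r with hmdef
    have hm : m % 7 = 0 := by rw [hmdef, hre]; omega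
    have hj : 1 ≤ (7 - r).toNat ∧ (7 - r).toNat ≤ 7 := by omega
    have hkey := key 19999999 (7 - r).toNat r.toNat m hj.1 hj.2 (by omega) hm
    have hfuel : 7 * 19999999 + (7 - r).toNat + r.toNat = 140000000 := by omega
    have hstart : m - ((7 - r).toNat : Int) = number := by
      have h7 : ((7 - r).toNat : Int) = 7 - r := by omega
      rw [h7, hmdef]; ring
    rw [hfuel, hstart, (by norm_num : (19999999 : Nat) + 1 = 20000000)] at hkey
    exact hkey
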